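-- pv_equiv track=rewrite | github.com/pypi-data/pypi-mirror-330 | packages/static-qualname/static_qualname-0.2.0.tar.gz/static_qualname-0.2.0/static_qualname/core.py | _dot_positions
-- ===== SOURCE A (Python) =====
-- from typing import Generator, Optional, TypeVar, cast
--
-- def _dot_positions(fqn: str) -> Generator[tuple[str, str], None, None]:
--     if not fqn:
--         yield ("", "")
--         return
--
--     # Try various dot positions from the right
--     pos = len(fqn)
--     yield (fqn, "")
--     while (pos := fqn.rfind(".", 0, pos)) != -1:
--         yield (fqn[:pos], fqn[pos + 1 :])
--     yield ("", fqn)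
-- ===== SOURCE B (Python) =====
-- def _dot_positions(fqn):
--     if not fqn:
--         yield ("", "")
--         return
--     yield (fqn, "")
--     mids = [(fqn[:i], fqn[i + 1:]) for i, c in enumerate(fqn) if c == "."]
--     yield from reversed(mids)
--     yield ("", fqn)
-- ===== Notes on version B (the rewrite author's own statement) =====
-- stated objective: idiomatic
-- what changed: Replaces the right-to-left rfind position scan (repeated rfind calls narrowing the end bound) with a single left-to-right enumerate pass that collects all dot splits into a list, yielded in reverse.
import Mathlib
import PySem

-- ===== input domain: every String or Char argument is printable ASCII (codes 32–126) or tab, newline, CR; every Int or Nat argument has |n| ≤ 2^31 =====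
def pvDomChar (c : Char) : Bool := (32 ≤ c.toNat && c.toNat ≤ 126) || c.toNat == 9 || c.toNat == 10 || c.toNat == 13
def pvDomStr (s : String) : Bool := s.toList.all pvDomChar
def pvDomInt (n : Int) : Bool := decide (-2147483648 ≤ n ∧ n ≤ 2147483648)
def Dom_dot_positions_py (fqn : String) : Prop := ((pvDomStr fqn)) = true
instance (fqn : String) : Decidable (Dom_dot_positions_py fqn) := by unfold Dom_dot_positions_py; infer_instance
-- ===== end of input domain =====

-- B replaces A's right-to-left repeated-rfind scan by one left-to-right enumerate pass
-- collecting all dot splits into a list, yielded in reverse (idiomatic; same return value).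

-- ===== PORT A =====
-- A-side helpers: the three lemmas below are cited by the port's termination proof (decreasing_by).

-- a singleton needle is a prefix of t.drop i exactly when the character at index i matches
theorem pv_prefix_drop (t : List Char) (i : Nat) :
    (['.'] <+: t.drop i) ↔ t[i]? = some '.' := by
  have h : t[i]? = (t.drop i).head? := by simp
  cases hd : t.drop i with
  | nil => simp [h, hd]
  | cons c cs => simp [h, hd, eq_comm]

-- spec of PySem.Chars.rfind.go on the single-character needle ['.']
theorem pv_rfind_go_spec (t : List Char) (j : Nat) :
    (PySem.Chars.rfind.go t ['.'] j = -1 ∧ ∀ i ≤ j, t[i]? ≠ some '.') ∨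
    (∃ i : Nat, i ≤ j ∧ PySem.Chars.rfind.go t ['.'] j = (i : Int) ∧ t[i]? = some '.' ∧
      ∀ k, i < k → k ≤ j → t[k]? ≠ some '.') := by
  induction j with
  | zero =>
    by_cases h : t[0]? = some '.'
    · right
      refine ⟨0, le_refl _, ?_, h, by omega⟩
      have := (pv_prefix_drop t 0).2 h
      simp at this
      simp [PySem.Chars.rfind.go, this]
    · left
      have : ¬ (['.'] <+: t) := by
        intro hp
        exact h ((pv_prefix_drop t 0).1 (by simpa using hp))
      refine ⟨by simp [PySem.Chars.rfind.go, this], ?_⟩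
      intro i hi
      interval_cases i
      exact h
  | succ j ih =>
    by_cases h : t[j+1]? = some '.'
    · right
      refine ⟨j+1, le_refl _, ?_, h, by omega⟩
      have := (pv_prefix_drop t (j+1)).2 h
      simp [PySem.Chars.rfind.go, this]
    · have hnp : ¬ (['.'] <+: t.drop (j+1)) := fun hp => h ((pv_prefix_drop t (j+1)).1 hp)
      have hgo : PySem.Chars.rfind.go t ['.'] (j+1) = PySem.Chars.rfind.go t ['.'] j := by
        simp [PySem.Chars.rfind.go, hnp]
      rcases ih with ⟨h1, h2⟩ | ⟨i, hij, hval, hdot, hmax⟩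
      · left
        refine ⟨by rw [hgo]; exact h1, ?_⟩
        intro i hi
        rcases Nat.lt_or_ge i (j+1) with hlt | hge
        · exact h2 i (by omega)
        · have : i = j + 1 := by omega
          rw [this]; exact h
      · right
        refine ⟨i, by omega, by rw [hgo]; exact hval, hdot, ?_⟩
        intro k hk1 hk2
        rcases Nat.lt_or_ge k (j+1) with hlt | hge
        · exact hmax k hk1 (by omega)
        · have : k = j + 1 := by omega
          rw [this]; exact h

-- spec of PySem.Chars.rfind on the needle ['.']: highest dot index, or -1
theorem pv_rfind_spec (t : List Char) :
    (PySem.Chars.rfind t ['.'] = -1 ∧ ∀ i : Nat, t[i]? ≠ some '.') ∨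
    (∃ i : Nat, i < t.length ∧ PySem.Chars.rfind t ['.'] = (i : Int) ∧ t[i]? = some '.' ∧
      ∀ k, i < k → t[k]? ≠ some '.') := by
  rcases pv_rfind_go_spec t t.length with ⟨h1, h2⟩ | ⟨i, hij, hval, hdot, hmax⟩
  · left
    refine ⟨h1, ?_⟩
    intro i
    rcases Nat.lt_or_ge t.length i with hgt | hle
    · simp [List.getElem?_eq_none (by omega : t.length ≤ i)]
    · exact h2 i hle
  · right
    have hilt : i < t.length := by
      rcases Nat.lt_or_ge i t.length with h | h
      · exact h
      · exact absurd hdot (by simp [List.getElem?_eq_none h])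
    refine ⟨i, hilt, hval, hdot, ?_⟩
    intro k hk
    rcases Nat.lt_or_ge k t.length with h | h
    · exact hmax k hk (by omega)
    · simp [List.getElem?_eq_none h]

-- rfindFrom with start 0 and a nonnegative end bound is rfind on the truncated list
theorem pv_rfindFrom_eq_rfind (s : List Char) (pos : Nat) :
    PySem.Chars.rfindFrom s ['.'] 0 (some (pos : Int)) = PySem.Chars.rfind (s.take pos) ['.'] := by
  unfold PySem.Chars.rfindFrom
  have h0 : ¬ ((0:Int) < 0) := by omega
  have h1 : ¬ ((pos:Int) < 0) := by omega
  simp only [if_neg h0, if_neg h1, Int.toNat_zero, List.drop_zero, zero_add]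
  by_cases hc : (s.length : Int) < (pos : Int)
  · have hlen : s.length ≤ pos := by exact_mod_cast hc.le
    have h2 : ¬ ((s.length : Int) < 0) := by omega
    simp only [if_pos hc, if_neg h2, Int.toNat_natCast, List.take_length,
      List.take_of_length_le hlen]
    split_ifs with h
    · exact h.symm
    · rfl
  · have h3 : ¬ ((pos : Int) < 0) := by omega
    simp only [if_neg hc, if_neg h3, Int.toNat_natCast]
    split_ifs with h
    · exact h.symm
    · rfl

-- termination bound for A's while loop: a found dot position is strictly below the end bound
theorem pv_rfindFrom_lt (s : List Char) (pos : Nat)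
    (h : PySem.Chars.rfindFrom s ['.'] 0 (some (pos : Int)) ≠ -1) :
    (PySem.Chars.rfindFrom s ['.'] 0 (some (pos : Int))).toNat < pos := by
  rw [pv_rfindFrom_eq_rfind] at *
  rcases pv_rfind_spec (s.take pos) with ⟨h1, _⟩ | ⟨i, hlt, hval, _, _⟩
  · exact absurd h1 h
  · rw [hval]
    have : (s.take pos).length ≤ pos := by simp
    simp
    omega

def dotPosLoopA (fqn : String) (pos : Nat) : List (String × String) :=
  let p := PySem.Str.rfindFrom fqn "." 0 (some (pos : Int))
  if h : p = -1 then [("", fqn)]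
  else (PySem.Str.slice fqn none (some p), PySem.Str.slice fqn (some (p + 1)) none) ::
        dotPosLoopA fqn p.toNat
termination_by pos
decreasing_by
  simp only [PySem.Str.rfindFrom_eq] at h ⊢
  exact pv_rfindFrom_lt fqn.toList pos (by simpa using h)

def dot_positions_py (fqn : String) : List (String × String) :=
  if PySem.Str.len fqn == 0 then [("", "")]
  else (fqn, "") :: dotPosLoopA fqn fqn.toList.length

-- ===== PORT B =====
def dot_positions_py_alt (fqn : String) : List (String × String) :=
  if PySem.Str.len fqn == 0 then [("", "")]
  else
    let mids := ((PySem.List.enumerate fqn.toList).filter (fun ic => ic.2 == '.')).map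
      (fun ic => (PySem.Str.slice fqn none (some ic.1), PySem.Str.slice fqn (some (ic.1 + 1)) none))
    (fqn, "") :: (mids.reverse ++ [("", fqn)])

-- ===== PRECONDITION & SPEC =====
def Spec_dot_positions_py (fqn : String) (out : List (String × String)) : Prop := out = dot_positions_py_alt fqn
instance (fqn : String) (out : List (String × String)) : Decidable (Spec_dot_positions_py fqn out) := by unfold Spec_dot_positions_py; infer_instance

-- ===== CLAIM (what is proved, stated in full; the proofs are below) =====
def Claim_equal_dot_positions_py : Prop := ∀ (fqn : String), Dom_dot_positions_py fqn → Spec_dot_positions_py fqn (dot_positions_py fqn)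

-- ===== LEMMAS AND PROOFS =====

-- a filter over a range up to pos, whose last hit is i, splits off [i]
theorem pv_filter_range_split (P : Nat → Bool) (i pos : Nat) (hlt : i < pos) (hP : P i = true)
    (hmax : ∀ k, i < k → k < pos → P k = false) :
    (List.range pos).filter P = ((List.range i).filter P) ++ [i] := by
  induction pos with
  | zero => omega
  | succ pos ih =>
    rcases Nat.lt_or_ge i pos with h | h
    · rw [List.range_succ, List.filter_append, ih h (fun k h1 h2 => hmax k h1 (by omega))]
      simp [hmax pos h (by omega)]
    · have : i = pos := by omega
      subst this
      rw [List.range_succ, List.filter_append]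
      simp [hP]

-- a filter over a range with no hits is empty
theorem pv_filter_range_nil (P : Nat → Bool) (pos : Nat) (h : ∀ k, k < pos → P k = false) :
    (List.range pos).filter P = [] := by
  rw [List.filter_eq_nil_iff]
  intro a ha
  simp [h a (List.mem_range.1 ha)]

-- the characterization of A's while loop: splits at all dot positions below pos, descending
theorem pv_loopA (fqn : String) (pos : Nat) (hpos : pos ≤ fqn.toList.length) :
    dotPosLoopA fqn pos =
      ((((List.range pos).filter (fun i => fqn.toList[i]? == some '.')).reverse).map
        (fun i : Nat => (PySem.Str.slice fqn none (some (i : Int)),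
                   PySem.Str.slice fqn (some ((i : Int) + 1)) none)))
      ++ [("", fqn)] := by
  induction pos using Nat.strong_induction_on with
  | _ pos ih =>
    rw [dotPosLoopA]
    have hre : PySem.Str.rfindFrom fqn "." 0 (some (pos : Int)) =
        PySem.Chars.rfind (fqn.toList.take pos) ['.'] := by
      rw [PySem.Str.rfindFrom_eq]
      have : (".".toList) = ['.'] := by decide
      rw [this, pv_rfindFrom_eq_rfind]
    have hlen : (fqn.toList.take pos).length = pos := by
      rw [List.length_take]; omega
    rcases pv_rfind_spec (fqn.toList.take pos) with ⟨h1, h2⟩ | ⟨i, hlt, hval, hdot, hmax⟩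
    · rw [dif_pos (by rw [hre]; exact h1)]
      rw [pv_filter_range_nil]
      · simp
      · intro k hk
        have := h2 k
        rw [List.getElem?_take_of_lt (by omega)] at this
        simpa using this
    · rw [hlen] at hlt
      have hpi : PySem.Str.rfindFrom fqn "." 0 (some (pos : Int)) = (i : Int) := by rw [hre, hval]
      rw [dif_neg (by rw [hpi]; omega)]
      have hdot' : fqn.toList[i]? = some '.' := by
        rw [← List.getElem?_take_of_lt hlt]; exact hdot
      rw [pv_filter_range_split (fun i => fqn.toList[i]? == some '.') i pos hlt (by simp [hdot'])
        (by
          intro k h1 h2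
          have := hmax k h1
          rw [List.getElem?_take_of_lt h2] at this
          simpa using this)]
      rw [hpi]
      simp only [Int.toNat_natCast, List.reverse_append, List.reverse_cons, List.reverse_nil,
        List.nil_append, List.singleton_append, List.map_cons]
      rw [ih i hlt (by omega)]
      simp

-- B's enumerate-filter pass produces exactly the dot positions (with their character), ascending
theorem pv_enumerate_filter (t : List Char) (st : Int) :
    (PySem.List.enumerate t st).filter (fun ic => ic.2 == '.') =
      ((List.range t.length).filter (fun i => t[i]? == some '.')).map
        (fun i : Nat => (st + (i : Int), '.')) := by
  induction t generalizing st with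
  | nil =>
    rw [PySem.List.enumerate]
    simp
  | cons c cs ih =>
    have hQ : ∀ i : Nat, (((c :: cs)[Nat.succ i]? == some '.')) = ((cs[i]? == some '.')) := by
      intro i; simp
    rw [PySem.List.enumerate, List.filter_cons, ih (st + 1),
        List.length_cons, List.range_succ_eq_map, List.filter_cons, List.filter_map]
    simp only [Function.comp_def, hQ]
    have htail : List.map (fun i : Nat => (st + 1 + (i : Int), ('.' : Char)))
          ((List.range cs.length).filter (fun i => cs[i]? == some '.')) =
        List.map (fun i : Nat => (st + (i : Int), ('.' : Char)))
          (List.map Nat.succ ((List.range cs.length).filter (fun i => cs[i]? == some '.'))) := by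
      rw [List.map_map]
      refine List.map_congr_left ?_
      intro a _
      simp only [Function.comp_apply, Nat.succ_eq_add_one, Prod.mk.injEq, and_true]
      push_cast
      ring
    by_cases hc : (c == '.') = true
    · have hc' : c = '.' := by simpa using hc
      subst hc'
      simp [htail]
    · simp [hc, htail]

-- ===== VERDICT (by name: the statement is the Claim_ definition above) =====
theorem dot_positions_py_spec : Claim_equal_dot_positions_py := by
  intro fqn _
  unfold Spec_dot_positions_py dot_positions_py dot_positions_py_alt
  by_cases h : (PySem.Str.len fqn == 0) = true
  · rw [if_pos h, if_pos h]
  · rw [if_neg h, if_neg h]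
    rw [pv_loopA fqn fqn.toList.length (le_refl _)]
    rw [pv_enumerate_filter fqn.toList 0]
    simp [List.map_map, Function.comp_def, zero_add, List.map_reverse]
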